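-- pv_equiv track=rewrite | github.com/adeeb10abbas/ECE350 | assembler/scratch1.py | A_register_symbol_isvalid
-- ===== SOURCE A (Python) =====
-- def A_register_symbol_isvalid(A_register_command):
--     valid = False
--     accepted_characters = ["_", ".", "$", ":"]
--     if A_register_command[0].isalpha(): #first character after @ is a upper or lowercase letter
--         for i in A_register_command:
--             if i in accepted_characters or i.isalnum():
--                 valid = True
--
--     elif A_register_command[0].isnumeric():
--         if A_register_command.isnumeric(): #TODO: What is an accepted A-value command?
--             valid = True
--
--     return valid
-- ===== SOURCE B (Python) =====
-- def A_register_symbol_isvalid(A_register_command):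
--     first = A_register_command[0]
--     if first.isalpha():
--         # first char is alphanumeric itself, so A's scan always sets valid
--         return True
--     elif first.isnumeric():
--         return A_register_command.isnumeric()
--     else:
--         return False
-- ===== Notes on version B (the rewrite author's own statement) =====
-- stated objective: simpler
-- what changed: Replaced the per-character scan (and the accepted-characters list) with direct guards: when the first character is alphabetic A's scan is vacuously always True (the first character is itself alphanumeric), so B returns True immediately; otherwise it returns cmd.isnumeric() for a numeric first character, else False.
import Mathlib
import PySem

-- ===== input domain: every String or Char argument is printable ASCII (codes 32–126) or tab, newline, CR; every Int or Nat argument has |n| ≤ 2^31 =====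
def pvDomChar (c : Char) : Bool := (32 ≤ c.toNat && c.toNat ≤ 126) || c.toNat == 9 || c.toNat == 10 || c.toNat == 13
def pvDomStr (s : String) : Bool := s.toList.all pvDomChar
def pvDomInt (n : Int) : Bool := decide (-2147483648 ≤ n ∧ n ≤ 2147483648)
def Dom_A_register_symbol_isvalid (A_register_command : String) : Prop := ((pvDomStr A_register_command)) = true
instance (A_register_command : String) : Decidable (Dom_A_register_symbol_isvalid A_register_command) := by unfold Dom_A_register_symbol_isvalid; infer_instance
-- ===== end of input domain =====

-- B replaces A's per-character scan (always True once the first character is alphabetic) with direct guards; simpler, same values.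

-- ===== PORT A =====
def pvAcceptedChars : List Char := ['_', '.', '$', ':']

def A_register_symbol_isvalid (A_register_command : String) : Bool :=
  -- valid = False; accepted_characters = [...]
  match PySem.Str.pyGet? A_register_command 0 with
  | none => false  -- unreachable under Pre_ (A raises IndexError on "")
  | some c0 =>
    if PySem.Chars.isalpha c0 then
      -- for i in A_register_command: if i in accepted_characters or i.isalnum(): valid = True
      A_register_command.toList.foldl
        (fun valid i => if pvAcceptedChars.contains i || PySem.Chars.isalnum i then true else valid)
        false
    else if PySem.Chars.isdigit c0 then  -- .isnumeric() = .isdigit() on the ASCII domain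
      if PySem.Str.strIsdigit A_register_command then true else false
    else false

-- ===== PORT B =====
def A_register_symbol_isvalid_alt (A_register_command : String) : Bool :=
  match PySem.Str.pyGet? A_register_command 0 with
  | none => false  -- unreachable under Pre_ (B raises IndexError on "")
  | some first =>
    if PySem.Chars.isalpha first then true
    else if PySem.Chars.isdigit first then PySem.Str.strIsdigit A_register_command
    else false

-- ===== PRECONDITION & SPEC =====
-- Pre_ excludes only the empty string, on which A raises IndexError (A_register_command[0]).
def Pre_A_register_symbol_isvalid (A_register_command : String) : Prop := A_register_command ≠ ""
instance (A_register_command : String) : Decidable (Pre_A_register_symbol_isvalid A_register_command) := by unfold Pre_A_register_symbol_isvalid; infer_instance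
def pvWitness_A_register_symbol_isvalid : String := "abc"

def Spec_A_register_symbol_isvalid (A_register_command : String) (out : Bool) : Prop := out = A_register_symbol_isvalid_alt A_register_command
instance (A_register_command : String) (out : Bool) : Decidable (Spec_A_register_symbol_isvalid A_register_command out) := by unfold Spec_A_register_symbol_isvalid; infer_instance

-- ===== CLAIM =====
def Claim_equal_A_register_symbol_isvalid : Prop := ∀ (A_register_command : String), Dom_A_register_symbol_isvalid A_register_command → Pre_A_register_symbol_isvalid A_register_command → Spec_A_register_symbol_isvalid A_register_command (A_register_symbol_isvalid A_register_command)

-- ===== LEMMAS AND PROOFS =====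
-- Once valid is true, A's scan keeps it true.
theorem pv_foldl_true (l : List Char) :
    l.foldl (fun valid i => if pvAcceptedChars.contains i || PySem.Chars.isalnum i then true else valid) true = true := by
  induction l with
  | nil => rfl
  | cons x xs ih => simp only [List.foldl_cons]; split <;> exact ih

theorem pv_scan_of_alpha (c : Char) (rest : List Char) (h : PySem.Chars.isalpha c = true) :
    (c :: rest).foldl (fun valid i => if pvAcceptedChars.contains i || PySem.Chars.isalnum i then true else valid) false = true := by
  have halnum : PySem.Chars.isalnum c = true := by simp [PySem.Chars.isalnum, h]
  simp only [List.foldl_cons, halnum, Bool.or_true, if_true]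
  exact pv_foldl_true rest

-- ===== VERDICT =====
theorem A_register_symbol_isvalid_spec : Claim_equal_A_register_symbol_isvalid := by
  intro s _ _
  unfold Spec_A_register_symbol_isvalid A_register_symbol_isvalid A_register_symbol_isvalid_alt
  simp only [PySem.Str.pyGet?_eq]
  cases hl : s.toList with
  | nil => simp [PySem.Chars.pyGet?_eq_listPyGet?, PySem.List.pyGet?, PySem.List.pyIdx?]
  | cons c rest =>
    simp only [PySem.Chars.pyGet?_eq_listPyGet?, PySem.List.pyGet?_zero_cons]
    by_cases ha : PySem.Chars.isalpha c = true
    · rw [if_pos ha, if_pos ha]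
      exact pv_scan_of_alpha c rest ha
    · rw [if_neg ha, if_neg ha]
      split <;> simp_all
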